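-- pv_equiv track=rewrite | github.com/ripper-roo/mc102 | lab06.py | correlacao_cruzada
-- ===== SOURCE A (Python) =====
-- def iguala_vetores(v1, v2, numero_v1, numero_v2):
--     """Iguala o número de elementos de duas listas para o maior possível
--
--     Parâmetros:
--
--     v1, v2: vetores a serem igualados.
--     numero_v1: número que será usado como padding para v1
--     numero_v2: número que será usado como padding para v2
--
--     """
--     maior = max(len(v1), len(v2))
--
--     for i in range(len(v1), maior):
--         v1.append(numero_v1)
--     for i in range(len(v2), maior):
--         v2.append(numero_v2)
--
--     return v1, v2
--
-- def produto_interno(v1, v2):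
--     if len(v1) != len(v2):
--         v1, v2 = iguala_vetores(v1, v2, 1, 1)
--
--     soma = 0
--     for i, j in zip(v1, v2):
--         soma += i*j
--
--     return [soma]
--
-- def correlacao_cruzada(v1, mascara):
--     n = len(v1)
--     k = len(mascara)
--
--     vetor_resultante = []
--     for i in range(0, n-k+1):
--         parte_v1 = v1[i:k+i]
--         soma_produto_interno = produto_interno(parte_v1, mascara)
--         vetor_resultante.append(*soma_produto_interno)
--
--     return vetor_resultante
-- ===== SOURCE B (Python) =====
-- def correlacao_cruzada(v1, mascara):
--     n = len(v1)
--     k = len(mascara)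
--     if k > n:
--         return []
--     m = n - k + 1
--     res = [0] * m
--     for j, c in enumerate(mascara):
--         for i in range(m):
--             res[i] += c * v1[i + j]
--     return res
-- ===== Notes on version B (the rewrite author's own statement) =====
-- stated objective: alternative
-- what changed: Replaces the per-window dot-product loop (slice + padded inner-product helper) by a scatter/contribution accumulation: one pass per mask coefficient adds its contribution into a preallocated result vector.
import Mathlib
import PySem

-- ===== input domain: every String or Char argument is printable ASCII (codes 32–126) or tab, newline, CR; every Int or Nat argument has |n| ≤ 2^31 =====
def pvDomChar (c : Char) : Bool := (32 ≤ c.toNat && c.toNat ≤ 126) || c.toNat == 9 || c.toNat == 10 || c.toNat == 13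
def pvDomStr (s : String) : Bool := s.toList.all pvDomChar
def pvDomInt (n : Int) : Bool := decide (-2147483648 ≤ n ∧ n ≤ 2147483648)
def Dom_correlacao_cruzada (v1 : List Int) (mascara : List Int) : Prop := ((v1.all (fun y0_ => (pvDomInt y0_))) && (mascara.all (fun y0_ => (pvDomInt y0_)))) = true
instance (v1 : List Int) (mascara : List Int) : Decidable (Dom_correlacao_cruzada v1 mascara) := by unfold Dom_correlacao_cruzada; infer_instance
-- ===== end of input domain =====

-- B replaces A's per-window dot products by a scatter accumulation over mask coefficients; objective: alternative structure, same cost.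

-- ===== PORT A =====
-- 'iguala_vetores': pads the shorter list with the given number up to the longer length
def iguala_vetores (v1 v2 : List Int) (numero_v1 numero_v2 : Int) : List Int × List Int :=
  let maior := max v1.length v2.length
  let v1' := (List.range (maior - v1.length)).foldl (fun acc _ => acc ++ [numero_v1]) v1
  let v2' := (List.range (maior - v2.length)).foldl (fun acc _ => acc ++ [numero_v2]) v2
  (v1', v2')

def produto_interno (v1 v2 : List Int) : List Int :=
  let p := if v1.length ≠ v2.length then iguala_vetores v1 v2 1 1 else (v1, v2)
  let soma := (p.1.zip p.2).foldl (fun s q => s + q.1 * q.2) 0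
  [soma]

def correlacao_cruzada (v1 : List Int) (mascara : List Int) : List Int :=
  let n : Int := v1.length
  let k : Int := mascara.length
  (PySem.List.pyRange 0 (n - k + 1) 1).foldl
    (fun acc i =>
      let parte_v1 := PySem.List.slice v1 (some i) (some (k + i))
      acc ++ produto_interno parte_v1 mascara) []

-- ===== PORT B =====
def correlacao_cruzada_alt (v1 : List Int) (mascara : List Int) : List Int :=
  let n := v1.length
  let k := mascara.length
  if k > n then []
  else
    let m := n - k + 1
    (PySem.List.enumerate mascara).foldl
      (fun res jc => res.mapIdx (fun i r => r + jc.2 * PySem.List.pyGetD v1 ((i : Int) + jc.1) 0))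
      (List.replicate m 0)

-- ===== PRECONDITION & SPEC =====
def Spec_correlacao_cruzada (v1 : List Int) (mascara : List Int) (out : List Int) : Prop := out = correlacao_cruzada_alt v1 mascara
instance (v1 : List Int) (mascara : List Int) (out : List Int) : Decidable (Spec_correlacao_cruzada v1 mascara out) := by unfold Spec_correlacao_cruzada; infer_instance

-- ===== CLAIM (what is proved, stated in full; the proofs are below) =====
def Claim_equal_correlacao_cruzada : Prop := ∀ (v1 : List Int) (mascara : List Int), Dom_correlacao_cruzada v1 mascara → Spec_correlacao_cruzada v1 mascara (correlacao_cruzada v1 mascara)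

-- ===== LEMMAS AND PROOFS =====

theorem mapIdx_snd {α : Type} (l : List α) : l.mapIdx (fun _ r => r) = l := by
  induction l with
  | nil => rfl
  | cons x xs ih => simpa [List.mapIdx_cons] using ih

theorem mapIdx_congr' {α β : Type} (l : List α) (f g : Nat → α → β)
    (h : ∀ i r, f i r = g i r) : l.mapIdx f = l.mapIdx g := by
  have : f = g := funext fun i => funext fun r => h i r
  rw [this]

-- sum of mask coefficients times v1 entries starting at position p
def corrS (v1 : List Int) (ms : List Int) (p : Nat) : Int :=
  match ms with
  | [] => 0
  | c :: t => c * PySem.List.pyGetD v1 (p : Int) 0 + corrS v1 t (p + 1)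

-- A's window dot product equals corrS when the window fits
theorem zip_fold_corrS (v1 : List Int) (ms : List Int) (p : Nat) (acc : Int)
    (h : p + ms.length ≤ v1.length) :
    ((((v1.drop p).take ms.length).zip ms).foldl (fun s q => s + q.1 * q.2) acc)
      = acc + corrS v1 ms p := by
  induction ms generalizing p acc with
  | nil => simp [corrS]
  | cons c t ih =>
    have hp : p < v1.length := by simp at h; omega
    have hdrop : v1.drop p = v1[p] :: v1.drop (p + 1) := (List.getElem_cons_drop hp).symm
    rw [hdrop]
    simp only [List.length_cons, List.take_succ_cons, List.zip_cons_cons, List.foldl_cons]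
    rw [ih (p + 1) _ (by simp at h ⊢; omega)]
    simp [corrS, PySem.List.pyGetD_natCast, List.getD_eq_getElem?_getD, hp]
    ring

-- B's accumulation invariant
theorem alt_fold_corrS (v1 : List Int) (ms : List Int) (j0 : Nat) (res : List Int) :
    (PySem.List.enumerate ms (j0 : Int)).foldl
      (fun res jc => res.mapIdx (fun i r => r + jc.2 * PySem.List.pyGetD v1 ((i : Int) + jc.1) 0))
      res
    = res.mapIdx (fun i r => r + corrS v1 ms (i + j0)) := by
  induction ms generalizing j0 res with
  | nil =>
    simp only [PySem.List.enumerate_nil, List.foldl_nil, corrS, Int.add_zero]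
    exact (mapIdx_snd res).symm
  | cons c t ih =>
    rw [PySem.List.enumerate_cons, List.foldl_cons]
    have : ((j0 : Int) + 1) = ((j0 + 1 : Nat) : Int) := by push_cast; ring
    rw [this, ih]
    rw [List.mapIdx_mapIdx]
    apply mapIdx_congr'
    intro i r
    have hc : ((i : Int) + (j0 : Int)) = ((i + j0 : Nat) : Int) := by push_cast; ring
    have hstep : corrS v1 (c :: t) (i + j0)
        = c * PySem.List.pyGetD v1 ((i + j0 : Nat) : Int) 0 + corrS v1 t ((i + j0) + 1) := rfl
    have h2 : i + (j0 + 1) = (i + j0) + 1 := by omega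
    rw [hstep, hc, h2]
    simp only [Function.comp_apply]
    ring

theorem mapIdx_replicate_zero (m : Nat) (f : Nat → Int) :
    (List.replicate m (0 : Int)).mapIdx (fun i r => r + f i) = (List.range m).map f := by
  apply List.ext_getElem
  · simp
  · intro i h1 h2
    simp

theorem window_eq (v1 ms : List Int) (t : Nat) (h : t + ms.length ≤ v1.length) :
    produto_interno (PySem.List.slice v1 (some (t : Int)) (some ((ms.length : Int) + (t : Int)))) ms
      = [corrS v1 ms t] := by
  have hsl : PySem.List.slice v1 (some (t : Int)) (some ((ms.length : Int) + (t : Int)))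
      = (v1.drop t).take ms.length := by
    have : ((ms.length : Int) + (t : Int)) = ((t : Nat) : Int) + ((ms.length : Nat) : Int) := by ring
    rw [this, PySem.List.slice_natCast_add]
  rw [hsl]
  have hlen : ((v1.drop t).take ms.length).length = ms.length := by
    simp; omega
  unfold produto_interno
  simp only [hlen, ne_eq, not_true_eq_false, if_false]
  rw [zip_fold_corrS v1 ms t 0 h]
  simp

theorem flatMap_singleton_eq_map (l : List Nat) (f : Nat → List Int) (g : Nat → Int)
    (h : ∀ t ∈ l, f t = [g t]) : l.flatMap f = l.map g := by
  induction l with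
  | nil => simp
  | cons x xs ih =>
    simp only [List.flatMap_cons, List.map_cons]
    rw [h x (by simp), ih (fun t ht => h t (by simp [ht]))]
    simp

theorem pyRange_flatMap_singleton (m : Nat) (F : Int → List Int) (g : Nat → Int)
    (h : ∀ t : Nat, t < m → F (t : Int) = [g t]) :
    (PySem.List.pyRange 0 (m : Int) 1).flatMap F = (List.range m).map g := by
  rw [PySem.List.pyRange_one]
  have hm : ((m : Int)).toNat = m := by omega
  simp only [Int.sub_zero, hm, List.flatMap_map]
  apply flatMap_singleton_eq_map
  intro t ht
  simpa using h t (List.mem_range.mp ht)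

-- ===== VERDICT (by name: the statement is the Claim_ definition above) =====
theorem correlacao_cruzada_spec : Claim_equal_correlacao_cruzada := by
  intro v1 mascara _
  unfold Spec_correlacao_cruzada correlacao_cruzada correlacao_cruzada_alt
  simp only []
  set n := v1.length with hn
  set k := mascara.length with hk
  by_cases hkn : k > n
  · -- empty range on A's side
    have : ((n : Int) - (k : Int) + 1) ≤ 0 := by omega
    rw [PySem.List.pyRange_one_eq_nil (by omega)]
    simp [hkn]
  · rw [if_neg hkn]
    set m := n - k + 1 with hm
    -- A side: flatMap of singleton windows
    rw [PySem.List.foldl_append_eq_flatMap, List.nil_append]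
    have hmi : ((n : Int) - (k : Int) + 1) = ((m : Nat) : Int) := by omega
    rw [hmi]
    -- B side
    have hB := alt_fold_corrS v1 mascara 0 (List.replicate m 0)
    rw [show ((0 : Nat) : Int) = 0 from rfl] at hB
    rw [hB]
    simp only [Nat.add_zero]
    rw [mapIdx_replicate_zero m (fun i => corrS v1 mascara i)]
    apply pyRange_flatMap_singleton
    intro t ht
    have hle : t + k ≤ n := by omega
    have := window_eq v1 mascara t (by omega)
    simpa [Int.add_comm] using this
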